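-- pv_equiv track=rewrite | github.com/grassFlamingo/BeamerAgent | latex_analyzer.py | _remove_line_comment
-- ===== SOURCE A (Python) =====
-- def _remove_line_comment(line: str) -> str:
--     """
--     Remove comment from a single line.
--     Handles \\% as escaped percent (not a comment starter).
--     """
--     result = []
--     i = 0
--     while i < len(line):
--         char = line[i]
--         if char == '%':
--             # Check if escaped (preceded by odd number of backslashes)
--             num_backslashes = 0
--             j = i - 1
--             while j >= 0 and line[j] == '\\':
--                 num_backslashes += 1
--                 j -= 1
--
--             if num_backslashes % 2 == 0:
--                 # Even number of backslashes = unescaped % = start of comment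
--                 break
--             else:
--                 # Odd number = escaped \%, keep it
--                 result.append(char)
--         else:
--             result.append(char)
--         i += 1
--     return ''.join(result)
-- ===== SOURCE B (Python) =====
-- def _remove_line_comment(line: str) -> str:
--     """Single forward pass keeping a running count of immediately preceding backslashes."""
--     result = []
--     backslashes = 0
--     for char in line:
--         if char == '\\':
--             result.append(char)
--             backslashes += 1
--         elif char == '%':
--             if backslashes % 2 == 0:
--                 break
--             result.append(char)
--             backslashes = 0
--         else:
--             result.append(char)
--             backslashes = 0
--     return ''.join(result)
-- ===== Notes on version B (the rewrite author's own statement) =====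
-- stated objective: faster
-- what changed: Replaced the backward rescan of preceding backslashes with a single forward pass maintaining a running backslash counter.
import Mathlib
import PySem

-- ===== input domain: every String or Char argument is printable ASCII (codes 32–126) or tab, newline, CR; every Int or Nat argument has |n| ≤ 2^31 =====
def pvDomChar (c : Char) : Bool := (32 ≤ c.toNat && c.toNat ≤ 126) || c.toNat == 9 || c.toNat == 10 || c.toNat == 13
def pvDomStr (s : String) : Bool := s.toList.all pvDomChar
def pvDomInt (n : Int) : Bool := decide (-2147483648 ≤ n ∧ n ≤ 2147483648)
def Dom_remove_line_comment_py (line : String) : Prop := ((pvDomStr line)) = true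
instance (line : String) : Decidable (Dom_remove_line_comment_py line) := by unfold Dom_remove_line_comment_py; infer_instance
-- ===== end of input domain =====

-- B replaces A's quadratic backward rescan of preceding backslashes with a
-- single forward pass maintaining a running backslash counter (O(n)).

-- ===== PORT A =====
-- A's inner `while j >= 0 and line[j] == '\\'` loop counts the backslashes at the
-- end of the already-processed prefix; we keep that prefix REVERSED, so the backward
-- scan is exactly counting leading '\\' of the reversed prefix.
def pvCountBS : List Char → Nat
  | [] => 0
  | c :: t => if c = '\\' then pvCountBS t + 1 else 0

-- rev = reversed prefix line[0:i] (= A's `result`), rest = line[i:]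
def pvGoA : List Char → List Char → List Char
  | rev, [] => rev.reverse
  | rev, c :: rest =>
    if c = '%' then
      if pvCountBS rev % 2 = 0 then rev.reverse
      else pvGoA (c :: rev) rest
    else pvGoA (c :: rev) rest

def remove_line_comment_py (line : String) : String :=
  String.mk (pvGoA [] line.toList)

-- ===== PORT B =====
-- acc = reversed collected output, k = running backslash counter
def pvGoB : List Char → Nat → List Char → List Char
  | acc, _, [] => acc.reverse
  | acc, k, c :: rest =>
    if c = '\\' then pvGoB (c :: acc) (k + 1) rest
    else if c = '%' then
      if k % 2 = 0 then acc.reverse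
      else pvGoB (c :: acc) 0 rest
    else pvGoB (c :: acc) 0 rest

def remove_line_comment_py_alt (line : String) : String :=
  String.mk (pvGoB [] 0 line.toList)

-- ===== PRECONDITION & SPEC =====
def Spec_remove_line_comment_py (line : String) (out : String) : Prop := out = remove_line_comment_py_alt line
instance (line : String) (out : String) : Decidable (Spec_remove_line_comment_py line out) := by unfold Spec_remove_line_comment_py; infer_instance

-- ===== CLAIM (what is proved, stated in full; the proofs are below) =====
def Claim_equal_remove_line_comment_py : Prop := ∀ (line : String), Dom_remove_line_comment_py line → Spec_remove_line_comment_py line (remove_line_comment_py line)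

-- ===== LEMMAS AND PROOFS =====
theorem pvGoA_eq_pvGoB (rest rev : List Char) :
    pvGoA rev rest = pvGoB rev (pvCountBS rev) rest := by
  induction rest generalizing rev with
  | nil => simp [pvGoA, pvGoB]
  | cons c rest ih =>
    by_cases hbs : c = '\\'
    · subst hbs
      have : pvCountBS ('\\' :: rev) = pvCountBS rev + 1 := by simp [pvCountBS]
      simp [pvGoA, pvGoB, ih, this]
    · by_cases hp : c = '%'
      · subst hp
        by_cases he : pvCountBS rev % 2 = 0
        · simp [pvGoA, pvGoB, he]
        · have h0 : pvCountBS ('%' :: rev) = 0 := by simp [pvCountBS]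
          simp [pvGoA, pvGoB, he, ih, h0]
      · have h0 : pvCountBS (c :: rev) = 0 := by simp [pvCountBS, hbs]
        simp [pvGoA, pvGoB, hbs, hp, ih, h0]

-- ===== VERDICT (by name: the statement is the Claim_ definition above) =====
theorem remove_line_comment_py_spec : Claim_equal_remove_line_comment_py := by
  intro line _
  unfold Spec_remove_line_comment_py remove_line_comment_py remove_line_comment_py_alt
  rw [pvGoA_eq_pvGoB]
  rfl
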